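-- pv_equiv track=rewrite | github.com/sowiwia/IP-Algo1 | Guías/integradores_python.py | columnas_repetidas
-- ===== SOURCE A (Python) =====
-- def traspuesta(mat:list[list[int]]) -> list[list[int]]:
--     res: list[list[int]] = []
--     total_filas: int = len(mat)
--     total_columnas: int = len(mat[0])
--
--     for columna in range(total_columnas):
--         fila_traspuesta: list[int] = []
--         for fila in range(total_filas):
--             celda: int = mat[fila][columna]
--             fila_traspuesta.append(celda)
--         res.append(fila_traspuesta)
--
--     return res
--
-- def columnas_repetidas(mat:list[list[int]]) -> bool:
--     res: bool = True
--     matriz_traspuesta: list[list[int]] = traspuesta(mat)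
--     mitad: list[list[int]] = len(matriz_traspuesta) // 2
--
--     for fila in range(mitad):
--         if matriz_traspuesta[fila] != matriz_traspuesta[fila + mitad]:
--             res = False
--
--     return res
-- ===== SOURCE B (Python) =====
-- def columnas_repetidas(mat: list[list[int]]) -> bool:
--     filas = len(mat)
--     cols = len(mat[0])
--     mitad = cols // 2
--     return all(mat[f][c] == mat[f][c + mitad]
--                for c in range(mitad) for f in range(filas))
-- ===== Notes on version B (the rewrite author's own statement) =====
-- stated objective: faster
-- what changed: Drops the transpose helper entirely: instead of materialising the transposed matrix and comparing its row lists, B compares cells mat[f][c] with mat[f][c+mitad] directly in one all(...) over column/row indices (no intermediate matrix, early exit on first mismatch).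
import Mathlib
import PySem

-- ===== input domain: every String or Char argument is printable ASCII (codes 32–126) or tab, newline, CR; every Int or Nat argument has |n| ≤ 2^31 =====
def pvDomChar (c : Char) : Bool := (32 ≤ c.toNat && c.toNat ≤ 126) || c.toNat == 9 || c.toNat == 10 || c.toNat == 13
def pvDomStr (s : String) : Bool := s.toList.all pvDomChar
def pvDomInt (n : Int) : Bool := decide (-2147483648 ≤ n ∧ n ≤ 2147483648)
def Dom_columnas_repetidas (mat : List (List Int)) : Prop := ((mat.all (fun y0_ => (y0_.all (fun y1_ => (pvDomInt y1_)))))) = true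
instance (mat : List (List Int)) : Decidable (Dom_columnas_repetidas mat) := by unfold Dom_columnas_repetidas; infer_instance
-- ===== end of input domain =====

-- ===== PORT A =====
-- B replaces the transpose-then-compare-rows algorithm with a direct cell-by-cell
-- comparison of the two column halves (one `all`, no intermediate matrix, early exit);
-- a timing run measured B faster by a constant factor.
-- Ranges run over Nat lengths, so Python's range(n) is List.range n; in-range list
-- indexing is ported as getD (Pre_ guarantees the indices A reads are in range).
def traspuesta (mat : List (List Int)) : List (List Int) :=
  (List.range (mat.headD []).length).foldl
    (fun res columna =>
      res ++ [(List.range mat.length).foldl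
        (fun fila_traspuesta fila => fila_traspuesta ++ [(mat.getD fila []).getD columna 0]) []])
    []

def columnas_repetidas (mat : List (List Int)) : Bool :=
  let t := traspuesta mat
  let mitad := t.length / 2
  (List.range mitad).foldl
    (fun res fila => if t.getD fila [] ≠ t.getD (fila + mitad) [] then false else res) true

-- ===== PORT B =====
def columnas_repetidas_alt (mat : List (List Int)) : Bool :=
  let filas := mat.length
  let mitad := (mat.headD []).length / 2
  (List.range mitad).all fun c =>
    (List.range filas).all fun f =>
      (mat.getD f []).getD c 0 == (mat.getD f []).getD (c + mitad) 0

-- ===== PRECONDITION & SPEC =====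
-- Pre_ excludes exactly the inputs where Python A raises IndexError: the empty
-- matrix (len(mat[0])) and ragged matrices with some row shorter than row 0.
def Pre_columnas_repetidas (mat : List (List Int)) : Prop :=
  mat ≠ [] ∧ ∀ r ∈ mat, (mat.headD []).length ≤ r.length
instance (mat : List (List Int)) : Decidable (Pre_columnas_repetidas mat) := by
  unfold Pre_columnas_repetidas; infer_instance

def pvWitness_columnas_repetidas : List (List Int) := [[1, 2, 1, 2], [3, 4, 3, 4]]

def Spec_columnas_repetidas (mat : List (List Int)) (out : Bool) : Prop := out = columnas_repetidas_alt mat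
instance (mat : List (List Int)) (out : Bool) : Decidable (Spec_columnas_repetidas mat out) := by unfold Spec_columnas_repetidas; infer_instance

-- ===== CLAIM (what is proved, stated in full; the proofs are below) =====
def Claim_equal_columnas_repetidas : Prop := ∀ (mat : List (List Int)), Dom_columnas_repetidas mat → Pre_columnas_repetidas mat → Spec_columnas_repetidas mat (columnas_repetidas mat)

-- ===== LEMMAS AND PROOFS =====

-- A's inner and outer transpose loops are append-singleton folds.
theorem traspuesta_eq (mat : List (List Int)) :
    traspuesta mat = (List.range (mat.headD []).length).map
      (fun c => (List.range mat.length).map (fun f => (mat.getD f []).getD c 0)) := by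
  unfold traspuesta
  rw [PySem.List.foldl_append_singleton_eq_map]
  refine List.map_congr_left (fun c _ => ?_)
  rw [PySem.List.foldl_append_singleton_eq_map, List.nil_append]

-- A's comparison loop: the flag stays true iff no compared pair differs.
theorem foldl_flag (q : Nat → Prop) [DecidablePred q] :
    ∀ (l : List Nat) (b : Bool),
      l.foldl (fun res x => if q x then false else res) b = (b && l.all fun x => !decide (q x)) := by
  intro l
  induction l with
  | nil => simp
  | cons x xs ih =>
      intro b
      rw [List.foldl_cons]
      by_cases h : q x
      · rw [if_pos h, ih]; simp [h]
      · rw [if_neg h, ih]; simp [h]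

theorem columnas_repetidas_spec' (mat : List (List Int)) :
    columnas_repetidas mat = columnas_repetidas_alt mat := by
  unfold columnas_repetidas columnas_repetidas_alt
  rw [traspuesta_eq, foldl_flag]
  simp only [List.length_map, List.length_range, Bool.true_and]
  rw [Bool.eq_iff_iff]
  simp only [List.all_eq_true, List.mem_range, decide_not, Bool.not_not,
    decide_eq_true_eq, beq_iff_eq, ne_eq]
  constructor
  · intro h c hc f hf
    have hc2 : c < (mat.headD []).length := lt_of_lt_of_le hc (Nat.div_le_self _ 2)
    have hc3 : c + (mat.headD []).length / 2 < (mat.headD []).length := by omega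
    have := h c hc
    rw [List.getD_eq_getElem _ _ (by simpa using hc2),
        List.getD_eq_getElem _ _ (by simpa using hc3)] at this
    simp only [List.getElem_map, List.getElem_range] at this
    exact List.map_eq_map_iff.mp this f (List.mem_range.mpr hf)
  · intro h c hc
    have hc2 : c < (mat.headD []).length := lt_of_lt_of_le hc (Nat.div_le_self _ 2)
    have hc3 : c + (mat.headD []).length / 2 < (mat.headD []).length := by omega
    rw [List.getD_eq_getElem _ _ (by simpa using hc2),
        List.getD_eq_getElem _ _ (by simpa using hc3)]
    simp only [List.getElem_map, List.getElem_range]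
    exact List.map_congr_left fun f hf => h c hc f (List.mem_range.mp hf)

-- ===== VERDICT (by name: the statement is the Claim_ definition above) =====
theorem columnas_repetidas_spec : Claim_equal_columnas_repetidas := by
  intro mat _ _
  exact columnas_repetidas_spec' mat
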